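-- pv_equiv track=rewrite | github.com/mustapharajaa/liveenity | SCRAP/generate_blog.py | parse_blog_content
-- ===== SOURCE A (Python) =====
-- from typing import List, Dict, Optional, Tuple
--
-- def parse_blog_content(blog_content: str) -> Tuple[str, str]:
--     """
--     Extract title and content from blog post.
--     The title is taken from the first line that starts with '**Meta Title:**'.
--     If not found, falls back to the first H1 heading.
--     """
--     lines = blog_content.split('\n')
--     title = ""
--     content_start = 0
--
--     # First try to find the meta title (handle both with and without space after colon)
--     for i, line in enumerate(lines):
--         line = line.strip()
--         if line.startswith('**Meta Title:**'):
--             # Remove '**Meta Title:**' and any leading/trailing whitespace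
--             title = line.replace('**Meta Title:**', '').strip()
--             content_start = i + 1
--             break
--
--     # If no meta title found, look for the first H1 heading
--     if not title:
--         for i, line in enumerate(lines):
--             line = line.strip()
--             if line.startswith('# '):
--                 title = line[2:].strip()  # Remove the '# ' prefix
--                 content_start = i + 1
--                 break
--
--     # The rest is content
--     content = '\n'.join(lines[content_start:]).strip()
--
--     return title, content
-- ===== SOURCE B (Python) =====
-- def parse_blog_content(blog_content: str):
--     """Single pass over the lines remembering the first meta-title line and the
--     first H1, then one selection step; content is the join from the chosen index."""
--     lines = blog_content.split('\n')
--     meta = None  # (index, extracted title) of first '**Meta Title:**' line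
--     h1 = None    # (index, extracted title) of first '# ' line
--     for i, raw in enumerate(lines):
--         line = raw.strip()
--         if meta is None and line.startswith('**Meta Title:**'):
--             meta = (i, line.replace('**Meta Title:**', '').strip())
--         if h1 is None and line.startswith('# '):
--             h1 = (i, line[2:].strip())
--     if meta is not None and meta[1]:
--         title, start = meta[1], meta[0] + 1
--     elif h1 is not None:
--         title, start = h1[1], h1[0] + 1
--     elif meta is not None:
--         title, start = '', meta[0] + 1
--     else:
--         title, start = '', 0
--     return title, '\n'.join(lines[start:]).strip()
-- ===== Notes on version B (the rewrite author's own statement) =====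
-- stated objective: alternative
-- what changed: Replaces A's two separate from-the-top scans (meta-title pass, then a full H1 pass) with one traversal that records the first meta-title line and the first H1 as it goes, followed by a single selection step.
import Mathlib
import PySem

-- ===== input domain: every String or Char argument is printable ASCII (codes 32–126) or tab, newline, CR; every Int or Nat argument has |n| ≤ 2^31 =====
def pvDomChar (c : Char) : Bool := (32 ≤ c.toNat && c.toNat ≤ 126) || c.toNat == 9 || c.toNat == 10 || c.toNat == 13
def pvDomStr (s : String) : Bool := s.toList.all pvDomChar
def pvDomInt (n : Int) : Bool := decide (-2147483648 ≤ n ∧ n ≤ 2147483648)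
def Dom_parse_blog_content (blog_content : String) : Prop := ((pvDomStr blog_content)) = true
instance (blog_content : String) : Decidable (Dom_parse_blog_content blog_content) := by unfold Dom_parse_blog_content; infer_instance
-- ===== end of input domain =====

-- B replaces A's two separate from-the-top scans with one traversal remembering the
-- first meta-title line and the first H1, plus one selection step (objective: alternative).

-- ===== PORT A =====
-- A's first loop: find first '**Meta Title:**' line, break with (title, i+1)
def pvMetaLoop : List (Int × String) → String × Int → String × Int
  | [], acc => acc
  | (i, raw) :: rest, acc =>
    let line := PySem.Str.strip raw
    if PySem.Str.startswith line "**Meta Title:**" then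
      (PySem.Str.strip (PySem.Str.replace line "**Meta Title:**" ""), i + 1)
    else pvMetaLoop rest acc

-- A's second loop: find first '# ' line, break with (line[2:].strip(), i+1)
def pvH1Loop : List (Int × String) → String × Int → String × Int
  | [], acc => acc
  | (i, raw) :: rest, acc =>
    let line := PySem.Str.strip raw
    if PySem.Str.startswith line "# " then
      (PySem.Str.strip (PySem.Str.slice line (some 2) none), i + 1)
    else pvH1Loop rest acc

def parse_blog_content (blog_content : String) : String × String :=
  let lines := (PySem.Str.split? blog_content "\n").getD []
  let p1 := pvMetaLoop (PySem.List.enumerate lines) ("", 0)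
  let p2 := if p1.1 = "" then pvH1Loop (PySem.List.enumerate lines) p1 else p1
  (p2.1, PySem.Str.strip (PySem.Str.join "\n" (PySem.List.slice lines (some p2.2) none)))

-- ===== PORT B =====
-- B's single pass: remember first meta-title hit and first H1 hit
def pvAltScan : List (Int × String) → Option (Int × String) → Option (Int × String) →
    Option (Int × String) × Option (Int × String)
  | [], m0, h1 => (m0, h1)
  | (i, raw) :: rest, m0, h1 =>
    let line := PySem.Str.strip raw
    let m0' := if m0.isNone && PySem.Str.startswith line "**Meta Title:**" then
        some (i, PySem.Str.strip (PySem.Str.replace line "**Meta Title:**" "")) else m0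
    let h1' := if h1.isNone && PySem.Str.startswith line "# " then
        some (i, PySem.Str.strip (PySem.Str.slice line (some 2) none)) else h1
    pvAltScan rest m0' h1'

def parse_blog_content_alt (blog_content : String) : String × String :=
  let lines := (PySem.Str.split? blog_content "\n").getD []
  let scan := pvAltScan (PySem.List.enumerate lines) none none
  let sel : String × Int :=
    match scan.1 with
    | some (mi, mt) =>
      if mt ≠ "" then (mt, mi + 1)
      else match scan.2 with
        | some (hi, ht) => (ht, hi + 1)
        | none => ("", mi + 1)
    | none =>
      match scan.2 with
      | some (hi, ht) => (ht, hi + 1)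
      | none => ("", 0)
  (sel.1, PySem.Str.strip (PySem.Str.join "\n" (PySem.List.slice lines (some sel.2) none)))

-- ===== PRECONDITION & SPEC =====
def Spec_parse_blog_content (blog_content : String) (out : String × String) : Prop := out = parse_blog_content_alt blog_content
instance (blog_content : String) (out : String × String) : Decidable (Spec_parse_blog_content blog_content out) := by unfold Spec_parse_blog_content; infer_instance

-- ===== CLAIM (what is proved, stated in full; the proofs are below) =====
def Claim_equal_parse_blog_content : Prop := ∀ (blog_content : String), Dom_parse_blog_content blog_content → Spec_parse_blog_content blog_content (parse_blog_content blog_content)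

-- ===== LEMMAS AND PROOFS =====

-- first meta-title hit in the enumerated lines, with its extracted title
def pvFindMeta : List (Int × String) → Option (Int × String)
  | [] => none
  | (i, raw) :: rest =>
    let line := PySem.Str.strip raw
    if PySem.Str.startswith line "**Meta Title:**" then
      some (i, PySem.Str.strip (PySem.Str.replace line "**Meta Title:**" ""))
    else pvFindMeta rest

def pvFindH1 : List (Int × String) → Option (Int × String)
  | [] => none
  | (i, raw) :: rest =>
    let line := PySem.Str.strip raw
    if PySem.Str.startswith line "# " then
      some (i, PySem.Str.strip (PySem.Str.slice line (some 2) none))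
    else pvFindH1 rest

theorem pvMetaLoop_eq (xs : List (Int × String)) (acc : String × Int) :
    pvMetaLoop xs acc = match pvFindMeta xs with
      | none => acc
      | some (i, t) => (t, i + 1) := by
  induction xs with
  | nil => rfl
  | cons p rest ih =>
    obtain ⟨i, raw⟩ := p
    simp only [pvMetaLoop, pvFindMeta]
    split_ifs <;> simp [ih]

theorem pvH1Loop_eq (xs : List (Int × String)) (acc : String × Int) :
    pvH1Loop xs acc = match pvFindH1 xs with
      | none => acc
      | some (i, t) => (t, i + 1) := by
  induction xs with
  | nil => rfl
  | cons p rest ih =>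
    obtain ⟨i, raw⟩ := p
    simp only [pvH1Loop, pvFindH1]
    split_ifs <;> simp [ih]

theorem pvAltScan_eq (xs : List (Int × String)) (m h : Option (Int × String)) :
    pvAltScan xs m h =
      ((match m with | some x => some x | none => pvFindMeta xs),
       (match h with | some x => some x | none => pvFindH1 xs)) := by
  induction xs generalizing m h with
  | nil => cases m <;> cases h <;> rfl
  | cons p rest ih =>
    obtain ⟨i, raw⟩ := p
    simp only [pvAltScan, pvFindMeta, pvFindH1, ih]
    cases m <;> cases h <;> simp <;> split_ifs <;> simp_all

-- ===== VERDICT (by name: the statement is the Claim_ definition above) =====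
theorem parse_blog_content_spec : Claim_equal_parse_blog_content := by
  intro s _
  unfold Spec_parse_blog_content parse_blog_content parse_blog_content_alt
  simp only [pvMetaLoop_eq, pvH1Loop_eq, pvAltScan_eq]
  cases hm : pvFindMeta (PySem.List.enumerate ((PySem.Str.split? s "\n").getD [])) with
  | none =>
    cases hh : pvFindH1 (PySem.List.enumerate ((PySem.Str.split? s "\n").getD [])) with
    | none => simp
    | some q => obtain ⟨hi, ht⟩ := q; simp
  | some q =>
    obtain ⟨mi, mt⟩ := q
    by_cases hmt : mt = ""
    · cases hh : pvFindH1 (PySem.List.enumerate ((PySem.Str.split? s "\n").getD [])) with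
      | none => simp [hmt]
      | some q' => obtain ⟨hi, ht⟩ := q'; simp [hmt]
    · simp [hmt]
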